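-- pv_equiv track=rewrite | github.com/j-chan97/pythonProject | Vacuum Cleaner Route.py | VC_Route
-- ===== SOURCE A (Python) =====
-- def VC_Route(route):
--     rlen = len(route)
--     x = 0
--     y = 0
--     for i in route:
--         if i == "L":
--             x -= 1
--         elif i == "R":
--             x += 1
--         elif i == "U":
--             y += 1
--         elif i == "D":
--             y -= 1
--     if x == 0 and y == 0:
--         return (True)
--     else:
--         return (False)
-- ===== SOURCE B (Python) =====
-- def VC_Route(route):
--     return route.count("L") == route.count("R") and route.count("U") == route.count("D")
-- ===== Notes on version B (the rewrite author's own statement) =====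
-- stated objective: idiomatic
-- what changed: Replaces the x/y displacement accumulator loop with direction-count comparisons via str.count: route returns to origin iff L/R counts and U/D counts match.
import Mathlib
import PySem

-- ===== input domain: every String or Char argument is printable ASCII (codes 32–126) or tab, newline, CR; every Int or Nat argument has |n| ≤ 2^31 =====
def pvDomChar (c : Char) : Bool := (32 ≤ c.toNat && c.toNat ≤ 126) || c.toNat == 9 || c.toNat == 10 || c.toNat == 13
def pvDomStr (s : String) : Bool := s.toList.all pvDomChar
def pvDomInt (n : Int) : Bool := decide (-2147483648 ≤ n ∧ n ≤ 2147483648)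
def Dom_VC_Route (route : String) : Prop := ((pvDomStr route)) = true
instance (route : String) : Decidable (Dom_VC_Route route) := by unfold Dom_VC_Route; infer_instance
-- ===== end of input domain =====

-- B replaces the x/y displacement accumulator loop with direction-count comparisons (idiomatic).
-- ===== PORT A =====
def VC_Route (route : String) : Bool :=
  let _rlen := route.length  -- rlen computed and unused, as in A
  let st := route.toList.foldl (fun (p : Int × Int) i =>
    if i == 'L' then (p.1 - 1, p.2)
    else if i == 'R' then (p.1 + 1, p.2)
    else if i == 'U' then (p.1, p.2 + 1)
    else if i == 'D' then (p.1, p.2 - 1)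
    else p) (0, 0)
  if st.1 = 0 ∧ st.2 = 0 then true else false

-- ===== PORT B =====
def VC_Route_alt (route : String) : Bool :=
  (PySem.Str.count route "L" == PySem.Str.count route "R") &&
  (PySem.Str.count route "U" == PySem.Str.count route "D")

-- ===== PRECONDITION & SPEC =====
def Spec_VC_Route (route : String) (out : Bool) : Prop := out = VC_Route_alt route
instance (route : String) (out : Bool) : Decidable (Spec_VC_Route route out) := by unfold Spec_VC_Route; infer_instance

-- ===== CLAIM (what is proved, stated in full; the proofs are below) =====
def Claim_equal_VC_Route : Prop := ∀ (route : String), Dom_VC_Route route → Spec_VC_Route route (VC_Route route)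

-- ===== LEMMAS AND PROOFS =====

-- helper: Chars.count with a one-character needle is List.count
lemma go_singleton (c : Char) : ∀ (fuel : Nat) (l : List Char) (acc : Nat),
    l.length ≤ fuel → PySem.Chars.count.go [c] fuel l acc = acc + l.count c := by
  intro fuel
  induction fuel with
  | zero => intro l acc h
            rw [List.length_eq_zero_iff.mp (Nat.le_zero.mp h)]
            simp [PySem.Chars.count.go]
  | succ n ih =>
      intro l acc h
      cases l with
      | nil => simp [PySem.Chars.count.go]
      | cons hd t =>
          simp only [PySem.Chars.count.go, List.isPrefixOf]
          by_cases hc : (c == hd) = true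
          · have hce : c = hd := beq_iff_eq.mp hc
            subst hce
            simp only [hc, Bool.true_and, if_true]
            rw [show List.drop [c].length (c :: t) = t from rfl,
              ih t (acc + 1) (by simpa using Nat.succ_le_succ_iff.mp h)]
            simp
            omega
          · have hne : hd ≠ c := fun h' => hc (by simp [h'])
            simp only [hc, Bool.false_and]
            rw [ih t acc (by simpa using Nat.succ_le_succ_iff.mp h)]
            simp [hne]

lemma count_singleton (l : List Char) (c : Char) :
    PySem.Chars.count l [c] = l.count c := by
  simp [PySem.Chars.count, go_singleton c l.length l 0 le_rfl]

-- loop invariant: A's fold computes net displacements as count differences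
lemma fold_inv (l : List Char) : ∀ (x y : Int),
    l.foldl (fun (p : Int × Int) i =>
      if i == 'L' then (p.1 - 1, p.2)
      else if i == 'R' then (p.1 + 1, p.2)
      else if i == 'U' then (p.1, p.2 + 1)
      else if i == 'D' then (p.1, p.2 - 1)
      else p) (x, y)
    = (x + (l.count 'R' : Int) - l.count 'L', y + (l.count 'U' : Int) - l.count 'D') := by
  induction l with
  | nil => intro x y; simp
  | cons hd t ih =>
      intro x y
      simp only [List.foldl_cons]
      by_cases h1 : hd = 'L'
      · subst h1
        show List.foldl _ (x - 1, y) t = _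
        rw [ih]
        simp only [List.count_cons, Prod.mk.injEq]
        norm_num
        omega
      · by_cases h2 : hd = 'R'
        · subst h2
          show List.foldl _ (x + 1, y) t = _
          rw [ih]
          simp only [List.count_cons, Prod.mk.injEq]
          norm_num
          omega
        · by_cases h3 : hd = 'U'
          · subst h3
            show List.foldl _ (x, y + 1) t = _
            rw [ih]
            simp only [List.count_cons, Prod.mk.injEq]
            norm_num
            omega
          · by_cases h4 : hd = 'D'
            · subst h4
              show List.foldl _ (x, y - 1) t = _
              rw [ih]
              simp only [List.count_cons, Prod.mk.injEq]
              norm_num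
              omega
            · have hstep : (if hd == 'L' then ((x:Int) - 1, (y:Int))
                else if hd == 'R' then (x + 1, y)
                else if hd == 'U' then (x, y + 1)
                else if hd == 'D' then (x, y - 1)
                else (x, y)) = (x, y) := by simp [h1, h2, h3, h4]
              rw [hstep, ih]
              simp [h1, h2, h3, h4]

-- ===== VERDICT (by name: the statement is the Claim_ definition above) =====
theorem VC_Route_spec : Claim_equal_VC_Route := by
  intro route _
  show VC_Route route = VC_Route_alt route
  unfold VC_Route VC_Route_alt
  rw [fold_inv]
  simp only [PySem.Str.count]
  by_cases h1 : (String.toList route).count 'L' = (String.toList route).count 'R' <;>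
    by_cases h2 : (String.toList route).count 'U' = (String.toList route).count 'D' <;>
      split_ifs with h <;> simp_all [count_singleton] <;> omega
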